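-- pv_equiv track=rewrite | github.com/Lingzixuehan/videolingo | front/src/common/whisper/core/translator.py | split_translation
-- ===== SOURCE A (Python) =====
-- def split_translation(translation: str, text_blocks: list) -> list:
--     """根据原文本长度比例分配翻译文本。
--
--     Args:
--         translation: 整体翻译后的中文文本
--         text_blocks: 原文本块列表，每个元素是(文本, 长度)元组
--
--     Returns:
--         list: 分割后的中文翻译列表
--     """
--     # 计算所有原文本的总长度
--     total_length = sum(length for _, length in text_blocks)
--
--     # 如果翻译为空，返回对应数量的空字符串
--     if not translation:
--         return [''] * len(text_blocks)
--
--     result = []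
--     translation_length = len(translation)
--     current_pos = 0
--
--     # 根据原文长度比例分配翻译文本
--     for _, length in text_blocks:
--         # 计算应分配的字符数
--         ratio = length / total_length
--         chars_to_take = round(translation_length * ratio)
--
--         # 确保不会超出字符串范围
--         if current_pos + chars_to_take > translation_length:
--             chars_to_take = translation_length - current_pos
--
--         # 提取对应的翻译文本段
--         if chars_to_take > 0 and current_pos < translation_length:
--             segment = translation[current_pos:current_pos + chars_to_take]
--             current_pos += chars_to_take
--         else:
--             segment = ''
--
--         result.append(segment)
--
--     # 如果还有剩余文本，添加到最后一段
--     if current_pos < translation_length: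
--         result[-1] += translation[current_pos:]
--
--     return result
-- ===== SOURCE B (Python) =====
-- def split_translation(translation: str, text_blocks: list) -> list:
--     """Consume the translation as a shrinking remainder string: each non-last
--     block slices its share off the front, and the last block takes whatever
--     remains (no position bookkeeping, no clamping against n, no post-loop
--     patching of result[-1])."""
--     total_length = sum(length for _, length in text_blocks)
--
--     if not translation:
--         return [''] * len(text_blocks)
--
--     n = len(translation)
--     rest = translation
--     result = []
--     for _, length in text_blocks[:-1]:
--         take = min(max(round(n * (length / total_length)), 0), len(rest))
--         result.append(rest[:take])
--         rest = rest[take:]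
--     result.append(rest)
--     return result
-- ===== Notes on version B (the rewrite author's own statement) =====
-- stated objective: alternative
-- what changed: B keeps no position counter and never clamps against the total length or patches result[-1]: it consumes the translation as a shrinking remainder string, each non-last block slicing its share off the front, and the last block simply taking the entire remainder (which subsumes A's leftover-patching step).
import Mathlib
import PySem

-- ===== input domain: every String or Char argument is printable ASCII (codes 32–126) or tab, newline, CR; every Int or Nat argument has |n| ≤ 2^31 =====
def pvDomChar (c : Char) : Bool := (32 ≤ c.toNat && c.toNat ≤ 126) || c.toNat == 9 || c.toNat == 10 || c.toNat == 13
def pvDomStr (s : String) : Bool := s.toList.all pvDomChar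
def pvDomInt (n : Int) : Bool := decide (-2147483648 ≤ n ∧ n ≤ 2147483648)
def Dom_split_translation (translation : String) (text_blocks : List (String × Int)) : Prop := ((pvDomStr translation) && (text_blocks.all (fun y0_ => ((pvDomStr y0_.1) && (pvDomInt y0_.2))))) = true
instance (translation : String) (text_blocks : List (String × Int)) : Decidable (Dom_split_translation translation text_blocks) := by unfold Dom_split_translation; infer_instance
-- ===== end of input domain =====

-- B keeps no position counter, no clamp against the total length and no result[-1] patch: it
-- consumes the translation as a shrinking remainder string — each non-last block slices its
-- share off the front, the last block takes the whole remainder (objective: alternative).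

-- ===== PORT A =====
-- Float helpers shared by both ports: Python's `round(n * (l / t))` over IEEE-754 doubles,
-- computed EXACTLY with rationals (round-to-nearest-even to 53-bit significand at each float op).
-- pvRheRat x = round-half-to-even of a rational to an integer (= Python round() on an exact value)
def pvRheRat (x : Rat) : Int :=
  let f := x.floor
  let r := x - (f : Rat)
  if r < 1/2 then f else if (1/2 : Rat) < r then f + 1 else if f % 2 = 0 then f else f + 1

def pvPow2 (e : Int) : Rat := if 0 ≤ e then ((2 : Rat)) ^ e.toNat else 1 / (2 : Rat) ^ (-e).toNat

-- largest e with 2^e ≤ a, for a > 0 (via bit lengths of numerator/denominator, then one fixup)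
def pvFloorLog2 (a : Rat) : Int :=
  let e0 : Int := (Nat.log2 a.num.natAbs : Int) - (Nat.log2 a.den : Int)
  if pvPow2 e0 ≤ a then e0 else e0 - 1

-- exact value of the IEEE-754 double nearest to x (no overflow/subnormals in this task's range)
def pvToDouble (x : Rat) : Rat :=
  if x = 0 then 0 else
    let a := |x|
    let ulp := pvPow2 (pvFloorLog2 a - 52)
    let m := pvRheRat (a / ulp)
    (if x < 0 then -1 else 1) * (m : Rat) * ulp

-- Python's round(n * (l / t)) : float division, float multiplication, round-half-even
def pvRoundF (n l t : Int) : Int := pvRheRat (pvToDouble ((n : Rat) * pvToDouble ((l : Rat) / (t : Rat))))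

-- loop body of A, as a function of the already-rounded chars_to_take
def pvStepA (t : String) (n : Int) (st : List String × Int) (chars0 : Int) : List String × Int :=
  let chars := if st.2 + chars0 > n then n - st.2 else chars0
  if chars > 0 ∧ st.2 < n then
    (st.1 ++ [PySem.Str.slice t (some st.2) (some (st.2 + chars))], st.2 + chars)
  else
    (st.1 ++ [""], st.2)

-- trailing "if current_pos < translation_length: result[-1] += translation[current_pos:]"
-- (result[-1] on an empty result is Python's IndexError; excluded by Pre_, getD "" is arbitrary there)
def pvPatch (t : String) (n : Int) (st : List String × Int) : List String :=
  if st.2 < n then st.1.dropLast ++ [st.1.getLast?.getD "" ++ PySem.Str.slice t (some st.2) none] else st.1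

def split_translation (translation : String) (text_blocks : List (String × Int)) : List String :=
  let total_length : Int := (text_blocks.map (fun p => p.2)).sum
  if translation = "" then
    List.replicate text_blocks.length ""
  else
    let translation_length : Int := (translation.toList.length : Int)
    pvPatch translation translation_length
      (text_blocks.foldl
        (fun st p => pvStepA translation translation_length st (pvRoundF translation_length p.2 total_length))
        ([], 0))

-- ===== PORT B =====
-- loop body of Source B: take = min(max(round(n*(l/total)),0), len(rest));
-- result.append(rest[:take]); rest = rest[take:]
def pvStepB (n tot : Int) (st : List String × String) (p : String × Int) : List String × String :=
  let take := min (max (pvRoundF n p.2 tot) 0) ((st.2.toList.length : Int))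
  (st.1 ++ [PySem.Str.slice st.2 none (some take)], PySem.Str.slice st.2 (some take) none)

def split_translation_alt (translation : String) (text_blocks : List (String × Int)) : List String :=
  let total_length : Int := (text_blocks.map (fun p => p.2)).sum
  if translation = "" then
    List.replicate text_blocks.length ""
  else
    let n : Int := (translation.toList.length : Int)
    -- for _, length in text_blocks[:-1]: …   (text_blocks[:-1] = PySem.List.slice … none (some (-1)))
    let st := (PySem.List.slice text_blocks none (some (-1))).foldl (pvStepB n total_length)
                ([], translation)
    st.1 ++ [st.2]

-- ===== PRECONDITION & SPEC =====
-- Pre_ excludes exactly the inputs where Python A raises: nonempty translation with empty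
-- text_blocks (IndexError on result[-1]) or with total length 0 (ZeroDivisionError).
def Pre_split_translation (translation : String) (text_blocks : List (String × Int)) : Prop :=
  translation = "" ∨ (text_blocks ≠ [] ∧ (text_blocks.map (fun p => p.2)).sum ≠ 0)
instance (translation : String) (text_blocks : List (String × Int)) : Decidable (Pre_split_translation translation text_blocks) := by unfold Pre_split_translation; infer_instance

def pvWitness_split_translation : String × (List (String × Int)) := ("ab", [("x", 1)])

def Spec_split_translation (translation : String) (text_blocks : List (String × Int)) (out : List String) : Prop := out = split_translation_alt translation text_blocks
instance (translation : String) (text_blocks : List (String × Int)) (out : List String) : Decidable (Spec_split_translation translation text_blocks out) := by unfold Spec_split_translation; infer_instance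

-- ===== CLAIM (what is proved, stated in full; the proofs are below) =====
def Claim_equal_split_translation : Prop := ∀ (translation : String) (text_blocks : List (String × Int)), Dom_split_translation translation text_blocks → Pre_split_translation translation text_blocks → Spec_split_translation translation text_blocks (split_translation translation text_blocks)


-- ===== LEMMAS AND PROOFS =====

-- bounds.append-style clamp used only in the proof's common description of both programs
def pvClampStep (n b s : Int) : Int := min n (b + max s 0)

theorem pv_slice_self (s : String) (a : Int) (h : 0 ≤ a) :
    PySem.Str.slice s (some a) (some a) = "" := by
  apply String.toList_inj.mp
  rw [PySem.Str.toList_slice]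
  rw [PySem.Chars.slice_eq_listSlice, PySem.List.slice_toNat _ h h]
  simp

theorem pv_slice_glue (s : String) (a b : Int) (h0 : 0 ≤ a) (hab : a ≤ b)
    (hbn : b ≤ (s.toList.length : Int)) :
    PySem.Str.slice s (some a) (some b) ++ PySem.Str.slice s (some b) none
      = PySem.Str.slice s (some a) (some ((s.toList.length : Int))) := by
  apply String.toList_inj.mp
  rw [String.toList_append, PySem.Str.toList_slice, PySem.Str.toList_slice, PySem.Str.toList_slice]
  simp only [PySem.Chars.slice_eq_listSlice]
  rw [PySem.List.slice_toNat _ h0 (le_trans h0 hab), PySem.List.slice_from _ (le_trans h0 hab),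
      PySem.List.slice_toNat _ h0 (by positivity)]
  have h2 : (s.toList.length : Int).toNat = s.toList.length := by omega
  rw [h2]
  have h3 : s.toList.length - a.toNat = (b.toNat - a.toNat) + (s.toList.length - b.toNat) := by omega
  rw [h3, List.take_add]
  congr 1
  rw [List.drop_drop]
  have h4 : a.toNat + (b.toNat - a.toNat) = b.toNat := by omega
  rw [h4, List.take_of_length_le (by simp)]

theorem pv_foldl_blocks (t : String) (n tot : Int) (tb : List (String × Int)) (init : List String × Int) :
    tb.foldl (fun st p => pvStepA t n st (pvRoundF n p.2 tot)) init
      = (tb.map (fun p => pvRoundF n p.2 tot)).foldl (pvStepA t n) init :=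
  (List.foldl_map).symm

-- the segments A produces, described recursively over the rounded sizes list
def pvSegs (t : String) (n : Int) : Int → List Int → List String
  | _, [] => []
  | pos, [_s] => [PySem.Str.slice t (some pos) (some n)]
  | pos, s :: s' :: rest =>
      PySem.Str.slice t (some pos) (some (pvClampStep n pos s)) :: pvSegs t n (pvClampStep n pos s) (s' :: rest)

theorem pvSegs_cons (t : String) (n pos s : Int) (l : List Int) (hl : l ≠ []) :
    pvSegs t n pos (s :: l)
      = PySem.Str.slice t (some pos) (some (pvClampStep n pos s)) :: pvSegs t n (pvClampStep n pos s) l := by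
  cases l with
  | nil => exact absurd rfl hl
  | cons a as => rfl

theorem pvStepA_eq (t : String) (n pos s : Int) (acc : List String)
    (h0 : 0 ≤ pos) (h1 : pos ≤ n) :
    pvStepA t n (acc, pos) s =
      (acc ++ [PySem.Str.slice t (some pos) (some (pvClampStep n pos s))], pvClampStep n pos s) := by
  unfold pvStepA pvClampStep
  by_cases hc : (if pos + s > n then n - pos else s) > 0 ∧ pos < n
  · rw [if_pos hc]
    have : pos + (if pos + s > n then n - pos else s) = min n (pos + max s 0) := by
      split_ifs with h <;> omega
    rw [this]
  · rw [if_neg hc]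
    have hcl : min n (pos + max s 0) = pos := by
      by_cases h2 : pos + s > n <;> simp [h2] at hc <;> omega
    rw [hcl, pv_slice_self t pos h0]

theorem pvA_eq (t : String) (n : Int) (hn : n = (t.toList.length : Int)) :
    ∀ (sizes : List Int), sizes ≠ [] → ∀ (pos : Int) (acc : List String), 0 ≤ pos → pos ≤ n →
      pvPatch t n (sizes.foldl (pvStepA t n) (acc, pos)) = acc ++ pvSegs t n pos sizes := by
  subst hn
  intro sizes
  induction sizes with
  | nil => intro h; exact absurd rfl h
  | cons s rest ih =>
    intro _ pos acc h0 h1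
    have hb0 : pos ≤ pvClampStep (t.toList.length : Int) pos s := by unfold pvClampStep; omega
    have hbn : pvClampStep (t.toList.length : Int) pos s ≤ (t.toList.length : Int) := by unfold pvClampStep; omega
    rw [List.foldl_cons, pvStepA_eq t _ pos s acc h0 h1]
    cases rest with
    | nil =>
      simp only [List.foldl_nil, pvPatch, pvSegs]
      by_cases hlt : pvClampStep (t.toList.length : Int) pos s < (t.toList.length : Int)
      · rw [if_pos hlt, List.dropLast_concat, List.getLast?_concat]
        simp only [Option.getD_some]
        rw [pv_slice_glue t pos (pvClampStep (t.toList.length : Int) pos s) h0 hb0 hbn]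
      · rw [if_neg hlt]
        have h5 : pvClampStep (t.toList.length : Int) pos s = (t.toList.length : Int) := by omega
        rw [h5]
    | cons s' rest' =>
      rw [ih (by simp) (pvClampStep (t.toList.length : Int) pos s)
          (acc ++ [PySem.Str.slice t (some pos) (some (pvClampStep (t.toList.length : Int) pos s))]) (le_trans h0 hb0) hbn]
      simp [pvSegs]

theorem pv_foldl_blocks_B (t : String) (n tot : Int) (tb : List (String × Int)) (init : List String × String) :
    tb.foldl (pvStepB n tot) init
      = (tb.map (fun p => pvRoundF n p.2 tot)).foldl
          (fun st s => (st.1 ++ [PySem.Str.slice st.2 none (some (min (max s 0) ((st.2.toList.length : Int))))],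
                        PySem.Str.slice st.2 (some (min (max s 0) ((st.2.toList.length : Int)))) none))
          init := by
  rw [List.foldl_map]
  rfl

-- B's fold with the remainder-string invariant: the remainder is t.toList.drop pos.toNat
theorem pvB_eq (t : String) (n : Int) (hn : n = (t.toList.length : Int)) :
    ∀ (szs : List Int) (slast pos : Int) (acc : List String) (R : String),
      0 ≤ pos → pos ≤ n → R.toList = t.toList.drop pos.toNat →
      (let st := szs.foldl
          (fun st s => (st.1 ++ [PySem.Str.slice st.2 none (some (min (max s 0) ((st.2.toList.length : Int))))],
                        PySem.Str.slice st.2 (some (min (max s 0) ((st.2.toList.length : Int)))) none))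
          (acc, R)
       st.1 ++ [st.2]) = acc ++ pvSegs t n pos (szs ++ [slast]) := by
  subst hn
  intro szs
  induction szs with
  | nil =>
    intro slast pos acc R h0 h1 hR
    simp only [List.foldl_nil, List.nil_append, pvSegs]
    have : R = PySem.Str.slice t (some pos) (some ((t.toList.length : Int))) := by
      apply String.toList_inj.mp
      rw [PySem.Str.toList_slice, PySem.Chars.slice_eq_listSlice,
          PySem.List.slice_toNat _ h0 (by positivity), hR]
      rw [List.take_of_length_le (by simp)]
    rw [this]
  | cons s rest ih =>
    intro slast pos acc R h0 h1 hR
    have hlen' : R.toList.length = t.toList.length - pos.toNat := by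
      rw [hR, List.length_drop]
    have hlen : (R.toList.length : Int) = (t.toList.length : Int) - pos := by omega
    have htk0 : 0 ≤ min (max s 0) ((R.toList.length : Int)) := by omega
    set tk := min (max s 0) ((R.toList.length : Int)) with htk
    have hclamp : pvClampStep (t.toList.length : Int) pos s = pos + tk := by
      unfold pvClampStep; omega
    have hseg : PySem.Str.slice R none (some tk)
        = PySem.Str.slice t (some pos) (some (pvClampStep (t.toList.length : Int) pos s)) := by
      apply String.toList_inj.mp
      rw [PySem.Str.toList_slice, PySem.Str.toList_slice]
      simp only [PySem.Chars.slice_eq_listSlice]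
      rw [PySem.List.slice_to _ htk0, PySem.List.slice_toNat _ h0 (by omega), hR, hclamp]
      congr 1
      omega
    have hrest : (PySem.Str.slice R (some tk) none).toList
        = t.toList.drop (pos + tk).toNat := by
      rw [PySem.Str.toList_slice]
      simp only [PySem.Chars.slice_eq_listSlice]
      rw [PySem.List.slice_from _ htk0, hR, List.drop_drop]
      congr 1
      omega
    simp only [List.foldl_cons]
    rw [List.cons_append, pvSegs_cons t _ pos s (rest ++ [slast]) (by simp)]
    have h2 : pos + tk ≤ (t.toList.length : Int) := by omega
    have := ih slast (pos + tk) (acc ++ [PySem.Str.slice R none (some tk)])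
      (PySem.Str.slice R (some tk) none) (by omega) h2 hrest
    simp only at this
    rw [← htk, this, hseg, hclamp]
    simp

-- ===== VERDICT (by name: the statement is the Claim_ definition above) =====
set_option maxHeartbeats 1000000 in
theorem split_translation_spec : Claim_equal_split_translation := by
  intro translation text_blocks _hdom hpre
  unfold Spec_split_translation
  by_cases ht : translation = ""
  · simp [split_translation, split_translation_alt, ht]
  · rcases hpre with h | ⟨htb, _htot⟩
    · exact absurd h ht
    rcases List.eq_nil_or_concat text_blocks with rfl | ⟨ys, q, rfl⟩
    · exact absurd rfl htb
    simp only [split_translation, split_translation_alt, if_neg ht, List.concat_eq_append]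
    rw [pv_foldl_blocks, PySem.List.slice_to_neg_one, List.dropLast_concat, pv_foldl_blocks_B]
    simp only [List.map_append, List.map_cons, List.map_nil]
    refine (pvA_eq translation ((translation.toList.length : Int)) rfl _ (by simp) 0 [] le_rfl (by positivity)).trans ?_
    exact (pvB_eq translation ((translation.toList.length : Int)) rfl _ _ 0 [] translation le_rfl (by positivity) (by simp)).symm
    exact translation
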